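-- pv_equiv track=rewrite | github.com/jonahgaudet/Advent | Day 6 Customs.py | processAnswersB
-- ===== SOURCE A (Python) =====
-- ALL_CHARACTERS = 'abcdefghijklmnopqrstuvwxyz'
--
-- def processAnswersB(groupInfo):
--     currentCharacters = [char for char in ALL_CHARACTERS]
--     yesCount = 0
--     for line in groupInfo:
--         if line == "" or line == '\n':
--             yesCount += len(currentCharacters)
--             currentCharacters = [char for char in ALL_CHARACTERS]
--             continue
--         else:
--             providedAnswers = [char for char in line]
--             i = 0
--             while i < len(currentCharacters):
--                 if currentCharacters[i] not in providedAnswers: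
--                     currentCharacters.pop(i)
--                 else:
--                     i += 1
--
--     yesCount += len(currentCharacters)
--
--     return yesCount
-- ===== SOURCE B (Python) =====
-- ALL_CHARACTERS = 'abcdefghijklmnopqrstuvwxyz'
--
-- def processAnswersB(groupInfo):
--     # Phase 1: partition the lines into groups on blank lines ('' or '\n'),
--     # keeping a trailing group after the last delimiter (possibly empty).
--     groups = []
--     current = []
--     for line in groupInfo:
--         if line == "" or line == '\n':
--             groups.append(current)
--             current = []
--         else:
--             current.append(line)
--     groups.append(current)
--
--     # Phase 2: each group's answer is the size of the intersection of the
--     # full alphabet with the character sets of its lines.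
--     total = 0
--     for group in groups:
--         common = set(ALL_CHARACTERS)
--         for line in group:
--             common &= set(line)
--         total += len(common)
--     return total
-- ===== Notes on version B (the rewrite author's own statement) =====
-- stated objective: simpler
-- what changed: Replaces A's fused one-pass loop with in-place index/pop filtering of a running character list by a two-phase algorithm: first split the lines into groups on blank lines, then score each group independently as the size of the intersection of the alphabet set with the set of each line.
import Mathlib
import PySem

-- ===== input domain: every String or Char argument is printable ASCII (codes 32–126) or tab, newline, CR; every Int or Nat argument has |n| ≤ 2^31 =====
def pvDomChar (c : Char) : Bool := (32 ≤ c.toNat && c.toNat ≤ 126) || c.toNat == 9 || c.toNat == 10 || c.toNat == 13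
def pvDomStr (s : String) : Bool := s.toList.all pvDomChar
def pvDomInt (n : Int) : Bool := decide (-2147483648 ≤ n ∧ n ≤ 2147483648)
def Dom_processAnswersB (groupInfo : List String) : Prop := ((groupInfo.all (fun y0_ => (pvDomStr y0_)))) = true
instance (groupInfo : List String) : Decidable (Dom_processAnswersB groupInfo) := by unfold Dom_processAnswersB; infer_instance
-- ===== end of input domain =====

-- B restructures A's fused loop (in-place pop-filtering of a running character list)
-- into two phases: split the lines into groups on blank lines, then score each group
-- as the size of the alphabet-set intersected with each line's character set (simpler).

-- ===== PORT A =====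
def pvAllChars : List Char := "abcdefghijklmnopqrstuvwxyz".toList

-- the while loop with pop(i): a pass over currentCharacters dropping chars not in providedAnswers
def pvPopLoop : List Char → List Char → List Char
  | [], _ => []
  | c :: rest, provided =>
    if provided.contains c = false then pvPopLoop rest provided
    else c :: pvPopLoop rest provided

def pvAStep (st : List Char × Int) (line : String) : List Char × Int :=
  if line = "" ∨ line = "\n" then (pvAllChars, st.2 + (st.1.length : Int))
  else (pvPopLoop st.1 line.toList, st.2)

def processAnswersB (groupInfo : List String) : Int :=
  let st := groupInfo.foldl pvAStep (pvAllChars, 0)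
  st.2 + (st.1.length : Int)

-- ===== PORT B =====
-- phase 1: split into groups on blank lines, keeping the trailing group
def pvBStep (st : List (List String) × List String) (line : String) :
    List (List String) × List String :=
  if line = "" ∨ line = "\n" then (st.1 ++ [st.2], []) else (st.1, st.2 ++ [line])

-- phase 2: a group's common set = alphabet set intersected with each line's set
def pvGroupCommon (g : List String) : PySem.Set Char :=
  g.foldl (fun s line => PySem.Set.inter s (PySem.Set.ofList line.toList))
    (PySem.Set.ofList pvAllChars)

def processAnswersB_alt (groupInfo : List String) : Int :=
  let p := groupInfo.foldl pvBStep ([], [])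
  (p.1 ++ [p.2]).foldl (fun total g => total + PySem.Set.len (pvGroupCommon g)) 0

-- ===== PRECONDITION & SPEC =====
def Spec_processAnswersB (groupInfo : List String) (out : Int) : Prop := out = processAnswersB_alt groupInfo
instance (groupInfo : List String) (out : Int) : Decidable (Spec_processAnswersB groupInfo out) := by unfold Spec_processAnswersB; infer_instance

-- ===== CLAIM (what is proved, stated in full; the proofs are below) =====
def Claim_equal_processAnswersB : Prop := ∀ (groupInfo : List String), Dom_processAnswersB groupInfo → Spec_processAnswersB groupInfo (processAnswersB groupInfo)

-- ===== LEMMAS AND PROOFS =====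

def pvScore (gs : List (List String)) : Int :=
  gs.foldl (fun total g => total + PySem.Set.len (pvGroupCommon g)) 0

lemma pvScore_foldl (gs : List (List String)) (t : Int) :
    gs.foldl (fun total g => total + PySem.Set.len (pvGroupCommon g)) t = t + pvScore gs := by
  induction gs generalizing t with
  | nil => simp [pvScore]
  | cons g gs ih =>
      simp only [pvScore, List.foldl_cons]
      rw [ih, ih (0 + _)]
      ring

lemma pvScore_cons (g : List String) (gs : List (List String)) :
    pvScore (g :: gs) = PySem.Set.len (pvGroupCommon g) + pvScore gs := by
  simp only [pvScore, List.foldl_cons, Int.zero_add]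
  rw [pvScore_foldl]
  simp [pvScore]

lemma pvPopLoop_eq_inter (s : List Char) (l : List Char) :
    pvPopLoop s l = PySem.Set.inter s (PySem.Set.ofList l) := by
  induction s with
  | nil => simp [pvPopLoop, PySem.Set.inter]
  | cons c rest ih =>
      by_cases hm : c ∈ l
      · have h1 : l.contains c = true := by simpa using hm
        simp [pvPopLoop, PySem.Set.inter, List.filter, hm, ih, PySem.Set.mem_ofList]
      · have h1 : l.contains c = false := by simpa using hm
        simp [pvPopLoop, PySem.Set.inter, List.filter, hm, ih, PySem.Set.mem_ofList]

lemma pvGroupCommon_snoc (g : List String) (line : String) :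
    pvGroupCommon (g ++ [line]) =
      PySem.Set.inter (pvGroupCommon g) (PySem.Set.ofList line.toList) := by
  simp [pvGroupCommon]

lemma pvGroupCommon_nil : pvGroupCommon [] = pvAllChars := by
  simp only [pvGroupCommon, List.foldl_nil]
  decide

lemma pvBStep_factor (lines : List String) (gs : List (List String)) (cur : List String) :
    lines.foldl pvBStep (gs, cur) =
      (gs ++ (lines.foldl pvBStep ([], cur)).1, (lines.foldl pvBStep ([], cur)).2) := by
  induction lines generalizing gs cur with
  | nil => simp
  | cons line rest ih =>
      simp only [List.foldl_cons, pvBStep]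
      by_cases h : line = "" ∨ line = "\n"
      · simp only [if_pos h, List.nil_append]
        rw [ih (gs ++ [cur]) [], ih [cur] []]
        simp
      · simp only [if_neg h]
        exact ih gs (cur ++ [line])

lemma pvMain (lines : List String) (cur : List String) (acc : Int) :
    (lines.foldl pvAStep (pvGroupCommon cur, acc)).2 +
      ((lines.foldl pvAStep (pvGroupCommon cur, acc)).1.length : Int)
    = acc + pvScore ((lines.foldl pvBStep ([], cur)).1 ++ [(lines.foldl pvBStep ([], cur)).2]) := by
  induction lines generalizing cur acc with
  | nil => simp [pvScore, PySem.Set.len]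
  | cons line rest ih =>
      simp only [List.foldl_cons, pvAStep, pvBStep]
      by_cases h : line = "" ∨ line = "\n"
      · simp only [if_pos h, List.nil_append]
        rw [pvBStep_factor rest [cur] []]
        have h1 : (pvAllChars, acc + ((pvGroupCommon cur).length : Int))
            = (pvGroupCommon [], acc + ((pvGroupCommon cur).length : Int)) := by
          rw [pvGroupCommon_nil]
        rw [h1, ih [] (acc + ((pvGroupCommon cur).length : Int))]
        rw [List.singleton_append, List.cons_append, pvScore_cons]
        simp only [PySem.Set.len]
        ring
      · simp only [if_neg h]
        have h2 : pvPopLoop (pvGroupCommon cur) line.toList = pvGroupCommon (cur ++ [line]) := by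
          rw [pvGroupCommon_snoc, pvPopLoop_eq_inter]
        rw [h2]
        exact ih (cur ++ [line]) acc

-- ===== VERDICT (by name: the statement is the Claim_ definition above) =====
theorem processAnswersB_spec : Claim_equal_processAnswersB := by
  intro groupInfo _
  unfold Spec_processAnswersB processAnswersB processAnswersB_alt
  have := pvMain groupInfo [] 0
  rw [pvGroupCommon_nil] at this
  simpa [pvScore] using this
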